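-- pv_equiv track=rewrite | github.com/joshuaNewman10/Algorithms | largestSquareSum/largestSquareSum.py | largest_sub_matrix_sum
-- ===== SOURCE A (Python) =====
-- def largest_sub_matrix_sum(matrix):
--     combos = []
--     height = len(matrix) -1
--     width = len(matrix) - 1
--
--     def inner_function(matrix, tl, br):
--         if (br[0] > width or br[1] > height):
--             return
--
--         combos.append((tl, br))
--
--         new_br = (br[0] + 1, br[1] + 1)
--         inner_function(matrix, tl, new_br)
--
--     for i in range(0, width):
--         for j in range(0, height):
--             inner_function(matrix, (i, j), (i, j))
--
--     # for index, combo in enumerate(combos):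
--     #     combos[index] = sub_matrix_sum(matrix, combo[0], combo[1])
--     return combos
-- ===== SOURCE B (Python) =====
-- def largest_sub_matrix_sum(matrix):
--     n = len(matrix) - 1
--     return [((i, j), (i + k, j + k))
--             for i in range(n)
--             for j in range(n)
--             for k in range(n - max(i, j) + 1)]
-- ===== Notes on version B (the rewrite author's own statement) =====
-- stated objective: simpler
-- what changed: Replaced the recursive inner_function with a mutated accumulator list by a single closed-form triple comprehension: for each corner (i,j) the diagonal length n - max(i,j) + 1 is computed directly, so there is no recursion and no append loop.
import Mathlib
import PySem

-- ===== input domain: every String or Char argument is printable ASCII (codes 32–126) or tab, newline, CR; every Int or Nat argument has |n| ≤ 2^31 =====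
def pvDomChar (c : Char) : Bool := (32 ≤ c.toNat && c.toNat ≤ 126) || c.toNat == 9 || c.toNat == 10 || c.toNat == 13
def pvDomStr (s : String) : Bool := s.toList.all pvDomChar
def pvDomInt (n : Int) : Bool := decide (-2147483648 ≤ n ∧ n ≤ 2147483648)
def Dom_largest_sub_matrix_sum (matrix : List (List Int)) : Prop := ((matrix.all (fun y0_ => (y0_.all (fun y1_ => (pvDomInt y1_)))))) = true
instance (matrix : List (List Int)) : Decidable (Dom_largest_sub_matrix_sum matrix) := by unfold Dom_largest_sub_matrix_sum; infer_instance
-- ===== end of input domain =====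

-- B replaces A's recursive inner_function with a single closed-form comprehension (objective: simpler).

-- ===== PORT A =====
-- 'inner_function': appends (tl, br) and recurses with both br components incremented,
-- until br[0] > width or br[1] > height. combos is threaded as an accumulator.
def pvInnerA (width height : Int) (tl br : Int × Int)
    (combos : List ((Int × Int) × (Int × Int))) : List ((Int × Int) × (Int × Int)) :=
  if br.1 > width ∨ br.2 > height then combos
  else pvInnerA width height tl (br.1 + 1, br.2 + 1) (combos ++ [(tl, br)])
termination_by (width + 1 - br.1).toNat
decreasing_by
  rename_i h
  simp only [not_or, not_lt] at h
  omega

def largest_sub_matrix_sum (matrix : List (List Int)) : List ((Int × Int) × (Int × Int)) :=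
  let height : Int := (matrix.length : Int) - 1
  let width : Int := (matrix.length : Int) - 1
  (PySem.List.pyRange 0 width 1).foldl (fun combos i =>
    (PySem.List.pyRange 0 height 1).foldl (fun combos j =>
      pvInnerA width height (i, j) (i, j) combos) combos) []

-- ===== PORT B =====
def largest_sub_matrix_sum_alt (matrix : List (List Int)) : List ((Int × Int) × (Int × Int)) :=
  let n : Int := (matrix.length : Int) - 1
  (PySem.List.pyRange 0 n 1).flatMap (fun i =>
    (PySem.List.pyRange 0 n 1).flatMap (fun j =>
      (PySem.List.pyRange 0 (n - max i j + 1) 1).map (fun k => ((i, j), (i + k, j + k)))))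

-- ===== PRECONDITION & SPEC =====
def Spec_largest_sub_matrix_sum (matrix : List (List Int)) (out : List ((Int × Int) × (Int × Int))) : Prop := out = largest_sub_matrix_sum_alt matrix
instance (matrix : List (List Int)) (out : List ((Int × Int) × (Int × Int))) : Decidable (Spec_largest_sub_matrix_sum matrix out) := by unfold Spec_largest_sub_matrix_sum; infer_instance

-- ===== CLAIM (what is proved, stated in full; the proofs are below) =====
def Claim_equal_largest_sub_matrix_sum : Prop := ∀ (matrix : List (List Int)), Dom_largest_sub_matrix_sum matrix → Spec_largest_sub_matrix_sum matrix (largest_sub_matrix_sum matrix)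

-- ===== LEMMAS AND PROOFS =====

-- the diagonal segment of corner pairs produced from (b1, b2), of length m
def pvSeg (tl : Int × Int) (b1 b2 : Int) (m : Nat) : List ((Int × Int) × (Int × Int)) :=
  (List.range m).map (fun (k : Nat) => (tl, (b1 + Int.ofNat k, b2 + Int.ofNat k)))

lemma pvSeg_succ (tl : Int × Int) (b1 b2 : Int) (m : Nat) :
    pvSeg tl b1 b2 (m + 1) = (tl, (b1, b2)) :: pvSeg tl (b1 + 1) (b2 + 1) m := by
  simp only [pvSeg, List.range_succ_eq_map, List.map_cons, List.map_map]
  congr 1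
  · simp
  · apply List.map_congr_left
    intro k _
    simp [Function.comp, Prod.ext_iff]
    omega

lemma pvInnerA_eq_seg (w : Int) (tl : Int × Int) :
    ∀ (m : Nat) (b1 b2 : Int) (acc : List ((Int × Int) × (Int × Int))),
      (w + 1 - max b1 b2).toNat = m →
      pvInnerA w w tl (b1, b2) acc = acc ++ pvSeg tl b1 b2 m := by
  intro m
  induction m with
  | zero =>
    intro b1 b2 acc h
    unfold pvInnerA
    have hg : b1 > w ∨ b2 > w := by omega
    simp [hg, pvSeg]
  | succ m ih =>
    intro b1 b2 acc h
    unfold pvInnerA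
    have hg : ¬ (b1 > w ∨ b2 > w) := by omega
    simp only [hg, if_false]
    rw [ih (b1 + 1) (b2 + 1) _ (by omega), pvSeg_succ]
    simp

lemma pyRange_map_eq_seg (w i j : Int) :
    (PySem.List.pyRange 0 (w - max i j + 1) 1).map (fun k => ((i, j), (i + k, j + k)))
      = pvSeg (i, j) i j (w + 1 - max i j).toNat := by
  rw [PySem.List.pyRange_one]
  simp only [List.map_map, pvSeg]
  have : (w - max i j + 1 - 0).toNat = (w + 1 - max i j).toNat := by omega
  rw [this]
  apply List.map_congr_left
  intro k _
  simp [Function.comp]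

-- ===== VERDICT (by name: the statement is the Claim_ definition above) =====
theorem largest_sub_matrix_sum_spec : Claim_equal_largest_sub_matrix_sum := by
  intro matrix _
  unfold Spec_largest_sub_matrix_sum largest_sub_matrix_sum largest_sub_matrix_sum_alt
  simp only
  set n : Int := (matrix.length : Int) - 1 with hn
  have inner : ∀ (i : Int) (acc : List ((Int × Int) × (Int × Int))),
      (PySem.List.pyRange 0 n 1).foldl (fun combos j => pvInnerA n n (i, j) (i, j) combos) acc
        = acc ++ (PySem.List.pyRange 0 n 1).flatMap (fun j =>
            (PySem.List.pyRange 0 (n - max i j + 1) 1).map (fun k => ((i, j), (i + k, j + k)))) := by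
    intro i acc
    rw [show (fun combos j => pvInnerA n n (i, j) (i, j) combos)
          = (fun combos j => combos ++ pvSeg (i, j) i j (n + 1 - max i j).toNat) from
        funext fun combos => funext fun j => pvInnerA_eq_seg n (i, j) _ i j combos rfl]
    rw [PySem.List.foldl_append_eq_flatMap]
    congr 1
    apply List.flatMap_congr
    intro j _
    exact (pyRange_map_eq_seg n i j).symm
  rw [show (fun combos i => (PySem.List.pyRange 0 n 1).foldl
          (fun combos j => pvInnerA n n (i, j) (i, j) combos) combos)
        = (fun combos i => combos ++ (PySem.List.pyRange 0 n 1).flatMap (fun j =>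
            (PySem.List.pyRange 0 (n - max i j + 1) 1).map (fun k => ((i, j), (i + k, j + k))))) from
      funext fun combos => funext fun i => inner i combos]
  rw [PySem.List.foldl_append_eq_flatMap]
  simp
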